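-- pv_equiv track=rewrite | github.com/alikhreis7/PythonProjects | a3_part2.py | casual_number
-- ===== SOURCE A (Python) =====
-- def casual_number(s):
--       a6= ""
--       flag = 0
--
--       for i in range((len(s))):
--
--            if ( s[i] == ',') :
--               a6 = a6
--            elif ( s[i].isdigit() ) :
--               a6 = a6 + s[i]
--               flag = 1
--            elif ( s[i] == '-' ) :
--               a6 = a6 + s[i]
--            else :
--               return None
--
--       if flag == 1:
--          return a6
--       else :
--          return None
-- ===== SOURCE B (Python) =====
-- DIGITS = frozenset('0123456789')
--
--
-- def casual_number(s):
--     cleaned = s.replace(',', '')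
--     if set(cleaned) <= DIGITS | {'-'} and not DIGITS.isdisjoint(cleaned):
--         return cleaned
--     return None
-- ===== Notes on version B (the rewrite author's own statement) =====
-- stated objective: simpler
-- what changed: Replaces A's per-character loop with accumulator and digit flag by set algebra: strip commas with str.replace, validate via a subset test of the string's character set against digits-plus-minus, and require a digit via a set disjointness test.
import Mathlib
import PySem

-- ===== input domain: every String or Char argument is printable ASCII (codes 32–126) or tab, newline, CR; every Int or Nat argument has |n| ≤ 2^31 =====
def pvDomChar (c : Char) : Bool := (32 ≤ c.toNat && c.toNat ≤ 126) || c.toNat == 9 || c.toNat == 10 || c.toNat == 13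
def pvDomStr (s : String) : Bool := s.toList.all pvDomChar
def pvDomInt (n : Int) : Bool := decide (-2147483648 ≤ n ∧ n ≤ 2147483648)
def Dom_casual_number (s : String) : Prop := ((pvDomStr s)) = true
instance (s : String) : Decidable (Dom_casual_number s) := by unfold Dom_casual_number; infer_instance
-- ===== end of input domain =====

-- B replaces A's per-character accumulator+flag loop by set algebra: strip commas with
-- replace, validate by a subset test on the character set, require a digit by a disjointness test.

-- ===== PORT A =====
-- the single pass: a6 is the accumulated cleaned string, flag records whether a digit was seen
def casualGo : List Char → List Char → Bool → Option String
  | [], a6, flag => if flag then some (String.ofList a6) else none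
  | c :: rest, a6, flag =>
    if c == ',' then casualGo rest a6 flag
    else if PySem.Chars.isdigit c then casualGo rest (a6 ++ [c]) true
    else if c == '-' then casualGo rest (a6 ++ [c]) flag
    else none

def casual_number (s : String) : Option String := casualGo s.toList [] false

-- ===== PORT B =====
-- DIGITS = frozenset('0123456789')
def pvDigits : PySem.Set Char := PySem.Set.ofList ['0','1','2','3','4','5','6','7','8','9']

def casual_number_alt (s : String) : Option String :=
  let cleaned := PySem.Chars.replace s.toList [','] []
  if PySem.Set.issubset (PySem.Set.ofList cleaned) (PySem.Set.union pvDigits ['-'])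
      && !(PySem.Set.isdisjoint pvDigits cleaned)
  then some (String.ofList cleaned) else none

-- ===== PRECONDITION & SPEC =====
def Spec_casual_number (s : String) (out : Option String) : Prop := out = casual_number_alt s
instance (s : String) (out : Option String) : Decidable (Spec_casual_number s out) := by unfold Spec_casual_number; infer_instance

-- ===== CLAIM (what is proved, stated in full; the proofs are below) =====
def Claim_equal_casual_number : Prop := ∀ (s : String), Dom_casual_number s → Spec_casual_number s (casual_number s)

-- ===== LEMMAS AND PROOFS =====

-- A's loop computes: valid chars only, keep non-commas, require a digit
theorem casualGo_characterize (l : List Char) (acc : List Char) (flag : Bool) :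
    casualGo l acc flag =
      if l.all (fun c => PySem.Chars.isdigit c || c == ',' || c == '-') then
        (if flag || l.any PySem.Chars.isdigit then
          some (String.ofList (acc ++ l.filter (fun c => c != ','))) else none)
      else none := by
  induction l generalizing acc flag with
  | nil => simp [casualGo]
  | cons c rest ih =>
    by_cases hc : c = ','
    · subst hc
      simp [casualGo, ih, (by decide : PySem.Chars.isdigit ',' = false)]
    · by_cases hd : PySem.Chars.isdigit c = true
      · have hcb : (c == ',') = false := by simp [hc]
        simp [casualGo, hcb, hd, ih, hc]
      · by_cases hm : c = '-'
        · subst hm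
          simp [casualGo, hd, ih]
        · have hcb : (c == ',') = false := by simp [hc]
          have hmb : (c == '-') = false := by simp [hm]
          simp [casualGo, hcb, hd, hmb]

-- s.replace(',', '') drops exactly the commas
theorem replaceGo_comma (l acc : List Char) (fuel : Nat) (h : l.length ≤ fuel) :
    PySem.Chars.replace.go [','] [] fuel l acc = acc.reverse ++ l.filter (fun c => c != ',') := by
  induction l generalizing acc fuel with
  | nil => cases fuel <;> simp [PySem.Chars.replace.go]
  | cons c t ih =>
    cases fuel with
    | zero => simp at h
    | succ f =>
      have ht : t.length ≤ f := by simpa using h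
      by_cases hc : c = ','
      · subst hc
        simp [PySem.Chars.replace.go, List.isPrefixOf, ih _ _ ht]
      · have hcb : (',' == c) = false := by simp [Ne.symm hc]
        have hcb' : (c != ',') = true := by simp [hc]
        simp [PySem.Chars.replace.go, List.isPrefixOf, hcb, hcb', ih _ _ ht]

theorem replace_comma (l : List Char) :
    PySem.Chars.replace l [','] [] = l.filter (fun c => c != ',') := by
  simpa using replaceGo_comma l [] l.length le_rfl

theorem mem_digits_iff (c : Char) :
    c ∈ (['0','1','2','3','4','5','6','7','8','9'] : List Char) ↔ PySem.Chars.isdigit c = true := by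
  simp only [PySem.Chars.isdigit, Bool.and_eq_true, decide_eq_true_eq, Char.le_def,
    UInt32.le_iff_toNat_le, List.mem_cons, List.not_mem_nil, or_false]
  show _ ↔ (48 ≤ c.val.toNat ∧ c.val.toNat ≤ 57)
  constructor
  · intro h
    rcases h with h|h|h|h|h|h|h|h|h|h <;> subst h <;> decide
  · rintro ⟨h1, h2⟩
    have hofn : c = Char.ofNat c.val.toNat := by
      rw [show c.val.toNat = c.toNat from rfl, Char.ofNat_toNat]
    have : c.val.toNat = 48 ∨ c.val.toNat = 49 ∨ c.val.toNat = 50 ∨ c.val.toNat = 51 ∨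
        c.val.toNat = 52 ∨ c.val.toNat = 53 ∨ c.val.toNat = 54 ∨ c.val.toNat = 55 ∨
        c.val.toNat = 56 ∨ c.val.toNat = 57 := by omega
    rcases this with h|h|h|h|h|h|h|h|h|h <;> rw [hofn, h] <;> decide

theorem mem_pvDigits_iff (c : Char) : c ∈ pvDigits ↔ PySem.Chars.isdigit c = true := by
  rw [pvDigits, PySem.Set.mem_ofList]
  exact mem_digits_iff c

-- B's subset test = A's per-character validity over the comma-free part
theorem subset_iff (l : List Char) :
    (PySem.Set.issubset (PySem.Set.ofList (l.filter (fun c => c != ',')))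
        (PySem.Set.union pvDigits ['-']) = true) ↔
      (l.all (fun c => PySem.Chars.isdigit c || c == ',' || c == '-') = true) := by
  rw [PySem.Set.issubset_iff]
  constructor
  · intro h
    rw [List.all_eq_true]
    intro c hc
    by_cases hcomma : c = ','
    · simp [hcomma]
    · have hmem : c ∈ PySem.Set.ofList (l.filter (fun c => c != ',')) := by
        rw [PySem.Set.mem_ofList, List.mem_filter]
        exact ⟨hc, by simp [hcomma]⟩
      have := h c hmem
      rw [PySem.Set.mem_union, mem_pvDigits_iff] at this
      rcases this with h1 | h1
      · simp [h1]
      · simp at h1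
        simp [h1]
  · intro h c hc
    rw [PySem.Set.mem_ofList, List.mem_filter] at hc
    rw [List.all_eq_true] at h
    have := h c hc.1
    rw [PySem.Set.mem_union, mem_pvDigits_iff]
    rcases Bool.or_eq_true_iff.mp this with h1 | h1
    · rcases Bool.or_eq_true_iff.mp h1 with h2 | h2
      · exact Or.inl h2
      · exfalso; revert h2; simpa using (by simpa using hc.2)
    · exact Or.inr (by simpa using h1)

-- B's disjointness test = A's digit flag (commas are not digits)
theorem pvDisjoint_iff (l : List Char) :
    (PySem.Set.isdisjoint pvDigits (l.filter (fun c => c != ',')) = false) ↔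
      (l.any PySem.Chars.isdigit = true) := by
  rw [← Bool.not_eq_true, not_iff_comm, PySem.Set.isdisjoint_iff]
  constructor
  · intro h c hc
    rw [mem_pvDigits_iff] at hc
    rw [List.mem_filter]
    rintro ⟨hmem, -⟩
    exact h (List.any_eq_true.mpr ⟨c, hmem, hc⟩)
  · intro h hany
    rcases List.any_eq_true.mp hany with ⟨c, hmem, hd⟩
    have hcomma : (c != ',') = true := by
      have hm := (mem_digits_iff c).mpr hd
      fin_cases hm <;> decide
    exact h c ((mem_pvDigits_iff c).mpr hd) (List.mem_filter.mpr ⟨hmem, hcomma⟩)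

-- ===== VERDICT (by name: the statement is the Claim_ definition above) =====
theorem casual_number_spec : Claim_equal_casual_number := by
  intro s _
  show casual_number s = casual_number_alt s
  rw [casual_number, casualGo_characterize]
  unfold casual_number_alt
  rw [replace_comma]
  have hsub : PySem.Set.issubset (PySem.Set.ofList (s.toList.filter (fun c => c != ',')))
      (PySem.Set.union pvDigits ['-']) =
      (s.toList.all fun c => PySem.Chars.isdigit c || c == ',' || c == '-') := by
    rw [Bool.eq_iff_iff]
    exact subset_iff s.toList
  have hdis : (!PySem.Set.isdisjoint pvDigits (s.toList.filter (fun c => c != ','))) =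
      s.toList.any PySem.Chars.isdigit := by
    rw [Bool.eq_iff_iff, Bool.not_eq_true']
    exact pvDisjoint_iff s.toList
  simp only [hsub, hdis]
  cases hall : (s.toList.all fun c => PySem.Chars.isdigit c || c == ',' || c == '-') <;>
    cases hany : s.toList.any PySem.Chars.isdigit <;> simp_all
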